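-- pv_equiv track=rewrite | github.com/pypi-data/pypi-mirror-392 | packages/specql-generator/specql_generator-0.5.0b0.tar.gz/specql_generator-0.5.0b0/src/infrastructure/parsers/kubernetes_parser.py | _group_manifests_by_kind
-- ===== SOURCE A (Python) =====
-- from typing import Dict, Any, List, Optional
--
-- def _group_manifests_by_kind(
--     manifests: List[Dict[str, Any]]
-- ) -> Dict[str, List[Dict[str, Any]]]:
--     """Group manifests by their kind"""
--     grouped = {}
--     for manifest in manifests:
--         kind = manifest.get("kind", "Unknown")
--         if kind not in grouped:
--             grouped[kind] = []
--         grouped[kind].append(manifest)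
--     return grouped
-- ===== SOURCE B (Python) =====
-- def _group_manifests_by_kind(manifests):
--     """Group manifests by their kind"""
--     kinds = list(dict.fromkeys(m.get("kind", "Unknown") for m in manifests))
--     return {k: [m for m in manifests if m.get("kind", "Unknown") == k]
--             for k in kinds}
-- ===== Notes on version B (the rewrite author's own statement) =====
-- stated objective: alternative
-- what changed: Replaces the single-pass dict-of-accumulators loop by a two-phase strategy: first compute the distinct kinds in first-appearance order (dict.fromkeys dedup), then build each group with a filter pass over the manifests.
import Mathlib
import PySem

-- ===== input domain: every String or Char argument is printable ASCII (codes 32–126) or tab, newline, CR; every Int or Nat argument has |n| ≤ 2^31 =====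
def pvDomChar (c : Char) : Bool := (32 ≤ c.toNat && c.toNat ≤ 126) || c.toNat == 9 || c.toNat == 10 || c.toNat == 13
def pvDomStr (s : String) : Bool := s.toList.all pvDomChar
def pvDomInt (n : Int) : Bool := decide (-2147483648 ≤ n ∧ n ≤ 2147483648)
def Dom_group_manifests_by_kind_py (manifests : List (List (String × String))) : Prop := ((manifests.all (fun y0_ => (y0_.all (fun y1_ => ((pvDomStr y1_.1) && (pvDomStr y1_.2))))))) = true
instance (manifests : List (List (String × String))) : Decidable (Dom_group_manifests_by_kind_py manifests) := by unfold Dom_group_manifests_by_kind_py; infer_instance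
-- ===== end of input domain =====

-- B replaces A's single-pass dict-of-accumulators with dedup-of-kinds + one filter per kind (alternative decomposition, same results).

-- ===== PORT A =====
-- manifest.get("kind", "Unknown")
def pvKindOf (m : List (String × String)) : String :=
  (PySem.Dict.mk m).getD "kind" "Unknown"

def group_manifests_by_kind_py (manifests : List (List (String × String))) : List (String × List (List (String × String))) :=
  (manifests.foldl (fun grouped manifest =>
      let kind := pvKindOf manifest
      let grouped := if grouped.contains kind then grouped else grouped.insert kind []
      -- grouped[kind].append(manifest): key is present, so this is d[kind] = d[kind] + [manifest]
      grouped.modify kind [] (fun l => l ++ [manifest]))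
    PySem.Dict.empty).items

-- ===== PORT B =====
def group_manifests_by_kind_py_alt (manifests : List (List (String × String))) : List (String × List (List (String × String))) :=
  -- kinds = list(dict.fromkeys(...)); the dict comprehension over these distinct keys is this items list
  (PySem.List.dedup (manifests.map pvKindOf)).map
    (fun k => (k, manifests.filter (fun m => pvKindOf m == k)))

-- ===== PRECONDITION & SPEC =====
def Spec_group_manifests_by_kind_py (manifests : List (List (String × String))) (out : List (String × List (List (String × String)))) : Prop := out = group_manifests_by_kind_py_alt manifests
instance (manifests : List (List (String × String))) (out : List (String × List (List (String × String)))) : Decidable (Spec_group_manifests_by_kind_py manifests out) := by unfold Spec_group_manifests_by_kind_py; infer_instance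

-- ===== CLAIM (what is proved, stated in full; the proofs are below) =====
def Claim_equal_group_manifests_by_kind_py : Prop := ∀ (manifests : List (List (String × String))), Dom_group_manifests_by_kind_py manifests → Spec_group_manifests_by_kind_py manifests (group_manifests_by_kind_py manifests)

-- ===== LEMMAS AND PROOFS =====

-- A's loop body (presence check + append) acts like a single modify-with-default-[].
theorem pv_step_eq_modify (d : PySem.Dict String (List (List (String × String)))) (m : List (String × String)) :
    (let kind := pvKindOf m
     let d' := if d.contains kind then d else d.insert kind []
     d'.modify kind [] (fun l => l ++ [m])) =
    d.modify (pvKindOf m) [] (fun l => l ++ [m]) := by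
  by_cases h : d.contains (pvKindOf m)
  · simp [h]
  · simp only [h, Bool.false_eq_true, if_false, PySem.Dict.modify,
      PySem.Dict.getD_insert_self, PySem.Dict.insert_insert_self,
      PySem.Dict.getD_of_not_contains _ _ (Bool.of_not_eq_true h)]

theorem group_manifests_by_kind_py_spec : Claim_equal_group_manifests_by_kind_py := by
  intro manifests _
  unfold Spec_group_manifests_by_kind_py group_manifests_by_kind_py group_manifests_by_kind_py_alt
  have hf : (fun (grouped : PySem.Dict String (List (List (String × String)))) manifest =>
      let kind := pvKindOf manifest
      let grouped := if grouped.contains kind then grouped else grouped.insert kind []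
      grouped.modify kind [] (fun l => l ++ [manifest])) =
      (fun d m => d.modify (pvKindOf m) [] (fun l => l ++ [m])) := by
    funext d m; exact pv_step_eq_modify d m
  rw [hf]
  -- view the loop as a fold over (kind, manifest) pairs
  have hmap : manifests.foldl (fun d m => d.modify (pvKindOf m) [] (fun l => l ++ [m]))
        PySem.Dict.empty =
      (manifests.map (fun m => (pvKindOf m, m))).foldl
        (fun d p => d.modify p.1 [] (fun l => l ++ [p.2])) PySem.Dict.empty := by
    rw [List.foldl_map]
  rw [hmap]
  set pairs := manifests.map (fun m => (pvKindOf m, m)) with hpairs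
  set D := pairs.foldl (fun d p => d.modify p.1 [] (fun l => l ++ [p.2])) PySem.Dict.empty with hD
  have hnd : D.keys.Nodup := by
    rw [hD]
    exact PySem.Dict.nodup_keys_foldl_modify_key pairs (fun p => p.1) []
      (fun d p => fun l => l ++ [p.2]) PySem.Dict.empty PySem.Dict.nodup_keys_empty
  have hkeys : D.keys = PySem.List.dedup (manifests.map pvKindOf) := by
    rw [hD]
    rw [PySem.Dict.keys_foldl_modify_key pairs (fun p => p.1) []
      (fun d p => fun l => l ++ [p.2]) PySem.Dict.empty]
    rw [PySem.List.dedup_eq_ofList]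
    simp [hpairs, PySem.Set.update, PySem.Set.ofList, PySem.Dict.keys, PySem.Dict.empty,
      List.map_map, Function.comp_def]
  have hgetD : ∀ k, D.getD k [] = manifests.filter (fun m => pvKindOf m == k) := by
    intro k
    rw [hD, PySem.Dict.getD_foldl_modify_append pairs PySem.Dict.empty k]
    rw [PySem.Dict.getD_of_not_contains _ _ (by simp [PySem.Dict.contains, PySem.Dict.empty])]
    simp [hpairs, List.filter_map, Function.comp_def, List.map_map]
  rw [PySem.Dict.items_eq_map_keys D hnd [], hkeys]
  apply List.map_congr_left
  intro k _
  rw [hgetD k]
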